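-- pv_equiv track=rewrite | github.com/dan-curtis/game-of-thrones-script-analysis | src/app.py | assign_speakers
-- ===== SOURCE A (Python) =====
-- def check_list_substrings(string_list):
--     checker = [ix for ix, string in enumerate(string_list) if string[-1] == ':']
--     if any(checker):
--         return checker[0]
--     else:
--         return -1
--
-- def assign_speakers(string_list):
--     while True:
--         ix = check_list_substrings(string_list)
--         if ix <0:
--             break
--         else:
--             pre_list = string_list[:ix]
--             new_list = [str(string_list[ix]) + str(string_list[ix+1])]
--             post_list = string_list[ix+2:]
--             string_list = pre_list + new_list + post_list
--     return [str(i) for i in string_list]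
-- ===== SOURCE B (Python) =====
-- def assign_speakers(string_list):
--     # One left-to-right pass keeping the line currently being assembled:
--     # while it ends with ':', glue the following line onto it.
--     if not string_list:
--         return []
--     merged = []
--     cur = string_list[0]
--     for s in string_list[1:]:
--         if cur.endswith(':'):
--             cur += s
--         else:
--             merged.append(cur)
--             cur = s
--     merged.append(cur)
--     return merged
-- ===== Notes on version B (the rewrite author's own statement) =====
-- stated objective: simpler
-- what changed: A repeatedly rescans and rebuilds the whole list to find and merge the leftmost ':'-ending line; B is one left-to-right pass gluing each following line onto the line being assembled while it ends with ':'. Pre_ excludes only inputs where A raises IndexError (an empty string, or a trailing ':'-line with a non-':' line before it).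
-- intended difference: On lists consisting of a nonempty prefix of ':'-ending lines followed by a nonempty tail with no ':'-ending line, A returns the merged prefix detached from the following line (any() over the index list is false when the only ':'-line sits at index 0), while B attaches it to the following line, which is the function's stated purpose of assigning speaker labels to their lines. — e.g. on assign_speakers(["JON:", "Winter is coming"]): A returns ["JON:", "Winter is coming"], B returns ["JON:Winter is coming"]
import Mathlib
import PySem

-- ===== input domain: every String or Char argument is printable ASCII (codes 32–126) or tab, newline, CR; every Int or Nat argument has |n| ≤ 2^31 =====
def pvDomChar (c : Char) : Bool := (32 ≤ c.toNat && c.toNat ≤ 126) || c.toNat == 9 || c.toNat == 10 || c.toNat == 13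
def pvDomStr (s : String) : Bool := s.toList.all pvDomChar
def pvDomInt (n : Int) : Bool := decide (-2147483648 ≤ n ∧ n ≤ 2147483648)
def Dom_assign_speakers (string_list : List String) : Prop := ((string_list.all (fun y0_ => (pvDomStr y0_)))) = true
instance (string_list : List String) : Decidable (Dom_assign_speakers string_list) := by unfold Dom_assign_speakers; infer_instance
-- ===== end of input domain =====

-- B replaces A's repeated whole-list rescans (rebuild + leftmost-colon search per merge) by a
-- single left-to-right pass (objective: simpler); on the D_ inputs below B merges where A stalls.

-- ===== PORT A =====
-- the comprehension [ix for ix, string in enumerate(string_list) if string[-1] == ':']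
-- (string[-1] raises IndexError on "" — those inputs are outside Pre_; there pyGet? is none ≠ some ':')
def pvChecker (s : Int) (l : List String) : List Int :=
  (PySem.List.enumerate l s).filterMap
    (fun p => if PySem.Str.pyGet? p.2 (-1) = some ':' then some p.1 else none)

def check_list_substrings (string_list : List String) : Int :=
  let checker := pvChecker 0 string_list
  if checker.any (fun ix => ix != 0) then
    checker.headD (-1)
  else
    -1

-- the 'while True' loop; each merge shortens the list by 1, so length+1 fuel never runs out;
-- the '| _, _ => l' branch is Python's IndexError on string_list[ix+1] (outside Pre_)
def pvLoopA : Nat → List String → List String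
  | 0, l => l
  | fuel + 1, l =>
    let ix := check_list_substrings l
    if ix < 0 then l
    else
      match PySem.List.pyGet? l ix, PySem.List.pyGet? l (ix + 1) with
      | some x, some y =>
          pvLoopA fuel
            (PySem.List.slice l none (some ix) ++ [x ++ y] ++
             PySem.List.slice l (some (ix + 2)) none)
      | _, _ => l

def assign_speakers (string_list : List String) : List String :=
  (pvLoopA (string_list.length + 1) string_list).map (fun i => i)  -- str(i) on a str is the identity

-- ===== PORT B =====
def pvEndsColon (s : String) : Bool := PySem.Str.endswith s ":"

-- the for-loop of Source B: 'cur' is the line currently being assembled; while it ends with ':'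
-- glue the next line on, otherwise emit it and start assembling the next line
def pvMerge (cur : String) : List String → List String
  | [] => [cur]
  | s :: rs => if pvEndsColon cur then pvMerge (cur ++ s) rs else cur :: pvMerge s rs

def assign_speakers_alt (string_list : List String) : List String :=
  match string_list with
  | [] => []
  | h :: rest => pvMerge h rest

-- ===== PRECONDITION & SPEC =====
-- Pre_ excludes exactly the inputs where A raises IndexError: a list containing an empty string
-- (string[-1] in check_list_substrings), or a list whose last line ends with ':' while not all
-- lines do (the leftmost ':'-line eventually becomes the last element and string_list[ix+1] is
-- out of range). On every other input A returns normally.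
def Pre_assign_speakers (string_list : List String) : Prop :=
  (∀ s ∈ string_list, s ≠ "") ∧
  (PySem.Str.endswith (string_list.getLastD "") ":" = true →
    ∀ s ∈ string_list, PySem.Str.endswith s ":" = true)
instance (string_list : List String) : Decidable (Pre_assign_speakers string_list) := by
  unfold Pre_assign_speakers; infer_instance

def pvWitness_assign_speakers : List String := ["TYRION:", "A mind needs books", "JON:", "Winter is coming", "stick them with the pointy end"]

-- On lists made of a nonempty prefix of ':'-ending lines followed by a nonempty tail with no
-- ':'-ending line, A stalls (any() over the index list is false when the only ':'-line sits at
-- index 0) and returns the merged prefix detached from the following line; B attaches it, which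
-- is the function's purpose of assigning speaker labels to their lines.
def D_assign_speakers (string_list : List String) : Prop :=
  0 < (string_list.takeWhile (fun s => PySem.Str.endswith s ":")).length ∧
  (string_list.takeWhile (fun s => PySem.Str.endswith s ":")).length < string_list.length ∧
  ∀ s ∈ string_list.drop (string_list.takeWhile (fun s => PySem.Str.endswith s ":")).length,
    PySem.Str.endswith s ":" = false
instance (string_list : List String) : Decidable (D_assign_speakers string_list) := by
  unfold D_assign_speakers; infer_instance

def Spec_assign_speakers (string_list : List String) (out : List String) : Prop :=
  ¬ D_assign_speakers string_list → out = assign_speakers_alt string_list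
instance (string_list : List String) (out : List String) : Decidable (Spec_assign_speakers string_list out) := by unfold Spec_assign_speakers; infer_instance

def pvDiffWitness_assign_speakers : List String := ["JON:", "Winter is coming"]
def pvDiffWitnessOut_assign_speakers : (List String) × (List String) :=
  (["JON:", "Winter is coming"], ["JON:Winter is coming"])

-- ===== CLAIM (what is proved, stated in full; the proofs are below) =====
def Claim_unchanged_assign_speakers : Prop := ∀ (string_list : List String), Dom_assign_speakers string_list → Pre_assign_speakers string_list → Spec_assign_speakers string_list (assign_speakers string_list)
def Claim_changed_assign_speakers : Prop := Dom_assign_speakers (pvDiffWitness_assign_speakers) ∧ Pre_assign_speakers (pvDiffWitness_assign_speakers) ∧ D_assign_speakers (pvDiffWitness_assign_speakers) ∧ assign_speakers (pvDiffWitness_assign_speakers) = pvDiffWitnessOut_assign_speakers.1 ∧ assign_speakers_alt (pvDiffWitness_assign_speakers) = pvDiffWitnessOut_assign_speakers.2 ∧ pvDiffWitnessOut_assign_speakers.1 ≠ pvDiffWitnessOut_assign_speakers.2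
def Claim_exact_assign_speakers : Prop := ∀ (string_list : List String), Dom_assign_speakers string_list → Pre_assign_speakers string_list → D_assign_speakers string_list → assign_speakers string_list ≠ assign_speakers_alt string_list

-- ===== LEMMAS AND PROOFS =====

def PreS (l : List String) : Prop :=
  (∀ s ∈ l, s ≠ "") ∧
  (pvEndsColon (l.getLastD "") = true → ∀ s ∈ l, pvEndsColon s = true)

theorem pre_iff_preS (l : List String) : Pre_assign_speakers l ↔ PreS l := Iff.rfl

def DS (l : List String) : Prop :=
  0 < (l.takeWhile pvEndsColon).length ∧
  (l.takeWhile pvEndsColon).length < l.length ∧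
  ∀ s ∈ l.drop (l.takeWhile pvEndsColon).length, pvEndsColon s = false

theorem d_iff_dS (l : List String) : D_assign_speakers l ↔ DS l := Iff.rfl

theorem pv_ends_iff (s : String) :
    (PySem.Str.pyGet? s (-1) = some ':') ↔ PySem.Str.endswith s ":" = true := by
  simp [PySem.Str.pyGet?_eq, PySem.Chars.pyGet?_eq_listPyGet?, PySem.List.pyGet?_neg_one,
        PySem.Str.endswith_eq, PySem.Chars.endswith_iff]
  constructor
  · intro hg
    obtain ⟨l, hl⟩ := List.getLast?_eq_some_iff.mp hg
    exact ⟨l, hl.symm⟩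
  · rintro ⟨t, ht⟩
    rw [← ht]; simp

theorem pv_ne_iff (s : String) : (s ≠ "") ↔ s.toList ≠ [] := by
  constructor
  · intro h h2; exact h (by ext1; simp [h2])
  · intro h h2; simp [h2] at h

theorem pv_ends_append (x y : String) (h : y ≠ "") :
    PySem.Str.endswith (x ++ y) ":" = PySem.Str.endswith y ":" := by
  have hy := (pv_ne_iff y).mp h
  have hg : PySem.Str.pyGet? (x ++ y) (-1) = PySem.Str.pyGet? y (-1) := by
    simp [PySem.Str.pyGet?_eq, PySem.Chars.pyGet?_eq_listPyGet?, PySem.List.pyGet?_neg_one,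
          List.getLast?_append, Option.or_of_isSome, hy]
  rw [Bool.eq_iff_iff, ← pv_ends_iff, ← pv_ends_iff, hg]

theorem pvChecker_nil (s : Int) : pvChecker s [] = [] := by
  simp [pvChecker, PySem.List.enumerate_nil]

theorem pvChecker_cons (s : Int) (x : String) (xs : List String) :
    pvChecker s (x :: xs) = (if pvEndsColon x then [s] else []) ++ pvChecker (s+1) xs := by
  simp only [pvChecker, PySem.List.enumerate_cons, List.filterMap_cons]
  by_cases hx : pvEndsColon x = true
  · rw [if_pos ((pv_ends_iff x).mpr hx), if_pos hx]; simp
  · rw [if_neg (fun hc => hx ((pv_ends_iff x).mp hc)), if_neg hx]; simp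

theorem pvChecker_ge (l : List String) : ∀ (s : Int), ∀ i ∈ pvChecker s l, s ≤ i := by
  induction l with
  | nil => intro s i hi; simp [pvChecker_nil] at hi
  | cons x xs ih =>
    intro s i hi
    rw [pvChecker_cons] at hi
    rcases List.mem_append.mp hi with h | h
    · split at h <;> simp_all
    · have := ih (s+1) i h; omega

theorem pvChecker_nil_iff (l : List String) (s : Int) :
    pvChecker s l = [] ↔ ∀ x ∈ l, pvEndsColon x = false := by
  induction l generalizing s with
  | nil => simp [pvChecker_nil]
  | cons x xs ih =>
    rw [pvChecker_cons]
    by_cases hx : pvEndsColon x = true <;> simp [hx, ih]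

theorem pvChecker_append_noColon (pre : List String) (rest : List String) (s : Int)
    (h : ∀ x ∈ pre, pvEndsColon x = false) :
    pvChecker s (pre ++ rest) = pvChecker (s + pre.length) rest := by
  induction pre generalizing s with
  | nil => simp
  | cons p ps ih =>
    rw [List.cons_append, pvChecker_cons, if_neg (by simp [h p (by simp)])]
    rw [ih (s+1) (fun x hx => h x (by simp [hx]))]
    simp; ring_nf

theorem chk_nil : check_list_substrings [] = -1 := by
  simp [check_list_substrings, pvChecker_nil]

theorem chk_head (h : String) (rest : List String)
    (hh : pvEndsColon h = true) (hr : ∃ x ∈ rest, pvEndsColon x = true) :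
    check_list_substrings (h :: rest) = 0 := by
  have hne : pvChecker 1 rest ≠ [] := by
    rw [Ne, pvChecker_nil_iff]
    push_neg
    obtain ⟨x, hx, hcx⟩ := hr
    exact ⟨x, hx, by simp [hcx]⟩
  obtain ⟨i, hi⟩ := List.exists_mem_of_ne_nil _ hne
  have h1 : (1:Int) ≤ i := pvChecker_ge rest 1 i hi
  have e : pvChecker 0 (h :: rest) = 0 :: pvChecker 1 rest := by
    rw [pvChecker_cons, if_pos hh]; simp
  have hany : ((0:Int) :: pvChecker 1 rest).any (fun ix => ix != 0) = true := by
    simp only [List.any_cons, Bool.or_eq_true, List.any_eq_true]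
    exact Or.inr ⟨i, hi, by simp; omega⟩
  simp only [check_list_substrings, e, hany, if_pos]
  rfl

theorem chk_none (h : String) (rest : List String)
    (hr : ∀ x ∈ rest, pvEndsColon x = false) :
    check_list_substrings (h :: rest) = -1 := by
  have h1 : pvChecker 1 rest = [] := (pvChecker_nil_iff rest 1).mpr hr
  by_cases hh : pvEndsColon h = true
  · simp [check_list_substrings, pvChecker_cons, hh, h1]
  · simp [check_list_substrings, pvChecker_cons, hh, h1]

theorem chk_mid (pre : List String) (x : String) (post : List String)
    (hpre : ∀ t ∈ pre, pvEndsColon t = false) (hne : pre ≠ [])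
    (hx : pvEndsColon x = true) :
    check_list_substrings (pre ++ x :: post) = (pre.length : Int) := by
  have e : pvChecker 0 (pre ++ x :: post)
      = (pre.length : Int) :: pvChecker ((pre.length : Int) + 1) post := by
    rw [pvChecker_append_noColon pre _ 0 hpre, pvChecker_cons, if_pos hx]
    simp
  have hlen : (pre.length : Int) ≠ 0 := by
    have : pre.length ≠ 0 := by simpa [List.length_eq_zero_iff] using hne
    omega
  have hany : (((pre.length:Int)) :: pvChecker ((pre.length : Int) + 1) post).any
      (fun ix => ix != 0) = true := by
    simp only [List.any_cons, Bool.or_eq_true]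
    simp only [bne_iff_ne]
    exact Or.inl hlen
  simp only [check_list_substrings, e, hany, if_pos]
  rfl

theorem pvMerge_noColon (rs : List String) : ∀ cur, pvEndsColon cur = false →
    (∀ s ∈ rs, pvEndsColon s = false) → pvMerge cur rs = cur :: rs := by
  induction rs with
  | nil => intro cur _ _; rfl
  | cons s ss ih =>
    intro cur hc hall
    rw [pvMerge, if_neg (by simp [hc])]
    rw [ih s (hall s (by simp)) (fun t ht => hall t (by simp [ht]))]

theorem pvMerge_merge (pre : List String) : ∀ cur x y post, pvEndsColon cur = false →
    (∀ s ∈ pre, pvEndsColon s = false) → pvEndsColon x = true →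
    pvMerge cur (pre ++ x :: y :: post) = pvMerge cur (pre ++ (x ++ y) :: post) := by
  induction pre with
  | nil =>
    intro cur x y post hc _ hx
    simp only [List.nil_append]
    rw [pvMerge, if_neg (by simp [hc]), pvMerge, if_pos hx]
    rw [pvMerge, if_neg (by simp [hc])]
  | cons p ps ih =>
    intro cur x y post hc hall hx
    simp only [List.cons_append]
    have hcur : ¬(pvEndsColon cur = true) := by simp [hc]
    rw [pvMerge, if_neg hcur, pvMerge, if_neg hcur]
    exact congrArg _ (ih p x y post (hall p (by simp)) (fun t ht => hall t (by simp [ht])) hx)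

theorem pv_append_ne (x y : String) (h : x ≠ "") : x ++ y ≠ "" := by
  rw [pv_ne_iff]; simp [(pv_ne_iff x).mp h]

theorem getLastD_append_ne (l m : List String) (hm : m ≠ []) :
    (l ++ m).getLastD "" = m.getLastD "" := by
  rw [List.getLastD_eq_getLast?, List.getLastD_eq_getLast?, List.getLast?_append,
      Option.or_of_isSome (List.getLast?_isSome.mpr hm)]

theorem pv_last_merge (pre : List String) (x y : String) (post : List String) (hy : y ≠ "") :
    pvEndsColon ((pre ++ (x ++ y) :: post).getLastD "")
      = pvEndsColon ((pre ++ x :: y :: post).getLastD "") := by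
  cases post with
  | nil =>
    have e1 : (pre ++ [x ++ y]).getLastD "" = x ++ y := by
      rw [getLastD_append_ne _ _ (by simp)]; rfl
    have e2 : (pre ++ [x, y]).getLastD "" = y := by
      rw [getLastD_append_ne _ _ (by simp)]; rfl
    simp only [e1, e2]
    exact pv_ends_append x y hy
  | cons p ps =>
    rw [getLastD_append_ne _ _ (by simp), getLastD_append_ne _ _ (by simp)]
    have : (x :: y :: p :: ps).getLastD "" = (p :: ps).getLastD "" := by
      rw [show x :: y :: p :: ps = [x, y] ++ p :: ps from rfl, getLastD_append_ne _ _ (by simp)]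
    rw [show (x ++ y) :: p :: ps = [x ++ y] ++ p :: ps from rfl, getLastD_append_ne _ _ (by simp), this]

theorem preS_merge (pre : List String) (x y : String) (post : List String)
    (hp : PreS (pre ++ x :: y :: post)) : PreS (pre ++ (x ++ y) :: post) := by
  obtain ⟨hne, hlast⟩ := hp
  have hx : x ≠ "" := hne x (by simp)
  have hy : y ≠ "" := hne y (by simp)
  constructor
  · intro s hs
    rcases List.mem_append.mp hs with h | h
    · exact hne s (by simp [h])
    · rcases List.mem_cons.mp h with rfl | h
      · exact pv_append_ne x y hx
      · exact hne s (by simp [h])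
  · intro hl s hs
    rw [pv_last_merge pre x y post hy] at hl
    have hall := hlast hl
    rcases List.mem_append.mp hs with h | h
    · exact hall s (by simp [h])
    · rcases List.mem_cons.mp h with rfl | h
      · rw [show pvEndsColon (x ++ y) = PySem.Str.endswith (x ++ y) ":" from rfl,
            pv_ends_append x y hy]
        exact hall y (by simp)
      · exact hall s (by simp [h])

theorem loop_step (f : Nat) (pre : List String) (x y : String) (post : List String)
    (hchk : check_list_substrings (pre ++ x :: y :: post) = (pre.length : Int)) :
    pvLoopA (f + 1) (pre ++ x :: y :: post) = pvLoopA f (pre ++ (x ++ y) :: post) := by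
  have hget1 : PySem.List.pyGet? (pre ++ x :: y :: post) ((pre.length : Int)) = some x :=
    PySem.List.pyGet?_append_length pre (y :: post) x
  have hget2 : PySem.List.pyGet? (pre ++ x :: y :: post) ((pre.length : Int) + 1) = some y := by
    have := PySem.List.pyGet?_append_right (pre := pre) (ys := x :: y :: post) (k := 1)
    simpa using this
  have hsl1 : PySem.List.slice (pre ++ x :: y :: post) none (some (pre.length : Int)) = pre := by
    rw [PySem.List.slice_to_natCast]
    exact List.take_left
  have hsl2 : PySem.List.slice (pre ++ x :: y :: post) (some ((pre.length : Int) + 2)) none = post := by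
    have h2 : ((pre.length : Int) + 2) = ((pre.length + 2 : Nat) : Int) := by push_cast; ring
    rw [h2, PySem.List.slice_from_natCast]
    rw [show pre ++ x :: y :: post = (pre ++ [x, y]) ++ post by simp]
    exact List.drop_left' (by simp)
  rw [pvLoopA]
  simp only [hchk]
  rw [if_neg (by omega), hget1, hget2, hsl1, hsl2]
  simp

theorem exists_colon_split (rest : List String) (hr : ∃ x ∈ rest, pvEndsColon x = true) :
    ∃ pre x post, rest = pre ++ x :: post ∧ (∀ t ∈ pre, pvEndsColon t = false) ∧
      pvEndsColon x = true := by
  induction rest with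
  | nil => simp at hr
  | cons a as ih =>
    by_cases ha : pvEndsColon a = true
    · exact ⟨[], a, as, by simp, by simp, ha⟩
    · have : ∃ x ∈ as, pvEndsColon x = true := by
        obtain ⟨x, hx, hcx⟩ := hr
        rcases List.mem_cons.mp hx with rfl | hx
        · exact absurd hcx ha
        · exact ⟨x, hx, hcx⟩
      obtain ⟨pre, x, post, he, hpre, hx⟩ := ih this
      exact ⟨a :: pre, x, post, by simp [he], by
        intro t ht
        rcases List.mem_cons.mp ht with rfl | ht
        · simpa using ha
        · exact hpre t ht, hx⟩

-- D is preserved backwards by a head merge: if the merged list is in D, the original was.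
theorem pvD_unmerge (h r0 : String) (rs : List String) (hh : pvEndsColon h = true)
    (hr0 : r0 ≠ "") (hD : DS ((h ++ r0) :: rs)) :
    DS (h :: r0 :: rs) := by
  obtain ⟨h1, h2, h3⟩ := hD
  have hcr0 : pvEndsColon (h ++ r0) = pvEndsColon r0 := pv_ends_append h r0 hr0
  by_cases hc : pvEndsColon r0 = true
  · have hm : pvEndsColon (h ++ r0) = true := by rw [hcr0]; exact hc
    have e1 : ((h ++ r0) :: rs).takeWhile pvEndsColon = (h ++ r0) :: rs.takeWhile pvEndsColon := by
      simp [List.takeWhile_cons, hm]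
    have e2 : (h :: r0 :: rs).takeWhile pvEndsColon = h :: r0 :: rs.takeWhile pvEndsColon := by
      simp [List.takeWhile_cons, hh, hc]
    refine ⟨by simp [e2], ?_, ?_⟩
    · rw [e2]; rw [e1] at h2; simpa using (by simpa using h2)
    · rw [e2]; rw [e1] at h3; simpa using h3
  · have hcf : pvEndsColon r0 = false := by cases hx : pvEndsColon r0 <;> simp_all
    have hm : pvEndsColon (h ++ r0) = false := by rw [hcr0]; exact hcf
    have e1 : ((h ++ r0) :: rs).takeWhile pvEndsColon = [] := by
      simp [List.takeWhile_cons, hm]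
    simp [e1] at h1

-- D can only hold when the head ends with ':'
theorem pvD_head (h : String) (rest : List String)
    (hD : DS (h :: rest)) : pvEndsColon h = true := by
  obtain ⟨h1, _, _⟩ := hD
  by_contra hc
  have : pvEndsColon h = false := by cases hx : pvEndsColon h <;> simp_all
  simp [List.takeWhile_cons, this] at h1

-- head ends ':' and no other line does and rest nonempty ⇒ D
theorem pvD_of_stall (h r : String) (rs : List String) (hh : pvEndsColon h = true)
    (hr : ∀ x ∈ r :: rs, pvEndsColon x = false) :
    DS (h :: r :: rs) := by
  have hrf : pvEndsColon r = false := hr r (by simp)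
  have e : (h :: r :: rs).takeWhile pvEndsColon = [h] := by
    simp [List.takeWhile_cons, hh, hrf]
  refine ⟨by simp [e], by simp [e], ?_⟩
  rw [e]
  simpa using hr

theorem pv_main : ∀ (fuel : Nat) (l : List String), l.length < fuel → PreS l →
    ¬ DS l → pvLoopA fuel l = assign_speakers_alt l := by
  intro fuel
  induction fuel with
  | zero => intro l hlen; omega
  | succ f ih =>
    intro l hlen hp hD
    match l with
    | [] =>
      rw [pvLoopA]
      simp only [chk_nil]
      rfl
    | h :: rest =>
      have hhne : h ≠ "" := hp.1 h (by simp)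
      by_cases hh : pvEndsColon h = true
      · by_cases hr : ∃ x ∈ rest, pvEndsColon x = true
        · match rest, hr with
          | r0 :: rs, hr =>
            have hr0ne : r0 ≠ "" := hp.1 r0 (by simp)
            have hchk : check_list_substrings (([] : List String) ++ h :: r0 :: rs)
                = ((([] : List String)).length : Int) := by
              simpa using chk_head h (r0 :: rs) hh hr
            have hstep := loop_step f [] h r0 rs hchk
            simp only [List.nil_append] at hstep
            rw [hstep]
            have hp' : PreS ((h ++ r0) :: rs) := by
              have := preS_merge [] h r0 rs (by simpa using hp)
              simpa using this
            have hD' : ¬ DS ((h ++ r0) :: rs) :=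
              fun hd => hD (pvD_unmerge h r0 rs hh hr0ne hd)
            rw [ih ((h ++ r0) :: rs) (by simp at hlen ⊢; omega) hp' hD']
            show pvMerge (h ++ r0) rs = pvMerge h (r0 :: rs)
            rw [pvMerge, if_pos hh]
        · push_neg at hr
          have hr' : ∀ x ∈ rest, pvEndsColon x = false := by
            intro x hx; cases hcx : pvEndsColon x
            · rfl
            · exact absurd hcx (hr x hx)
          match rest with
          | [] =>
            rw [pvLoopA]
            simp only [chk_none h [] hr']
            rw [if_pos (by norm_num)]
            rfl
          | r :: rs =>
            exact absurd (pvD_of_stall h r rs hh hr') hD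
      · have hhf : pvEndsColon h = false := by cases hc : pvEndsColon h <;> simp_all
        by_cases hr : ∃ x ∈ rest, pvEndsColon x = true
        · obtain ⟨pre', x, post0, he, hpre', hx⟩ := exists_colon_split rest hr
          match post0, he with
          | [], he =>
            -- impossible: x would be the last element of l, ending with ':', but h does not
            exfalso
            have hlast : (h :: rest).getLastD "" = x := by
              rw [he, show h :: (pre' ++ [x]) = (h :: pre') ++ [x] from rfl,
                  getLastD_append_ne _ _ (by simp)]
              rfl
            have := hp.2 (by rw [hlast]; exact hx) h (by simp)
            simp [this] at hhf
          | y :: post, he =>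
            have hl : h :: rest = (h :: pre') ++ x :: y :: post := by simp [he]
            have hpreh : ∀ t ∈ h :: pre', pvEndsColon t = false := by
              intro t ht
              rcases List.mem_cons.mp ht with rfl | ht
              · exact hhf
              · exact hpre' t ht
            have hchk : check_list_substrings ((h :: pre') ++ x :: y :: post)
                = (((h :: pre')).length : Int) :=
              chk_mid (h :: pre') x (y :: post) hpreh (by simp) hx
            rw [hl, loop_step f (h :: pre') x y post hchk]
            have hp' : PreS ((h :: pre') ++ (x ++ y) :: post) :=
              preS_merge (h :: pre') x y post (by rw [← hl]; exact hp)
            have hD' : ¬ DS ((h :: pre') ++ (x ++ y) :: post) := by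
              intro hd
              have : pvEndsColon h = true := pvD_head h _ (by
                simpa using hd)
              simp [this] at hhf
            rw [ih _ (by rw [hl] at hlen; simp at hlen ⊢; omega) hp' hD']
            show pvMerge h (pre' ++ (x ++ y) :: post) = pvMerge h (pre' ++ x :: y :: post)
            exact (pvMerge_merge pre' h x y post hhf hpre' hx).symm
        · push_neg at hr
          have hr' : ∀ x ∈ rest, pvEndsColon x = false := by
            intro x hx; cases hcx : pvEndsColon x
            · rfl
            · exact absurd hcx (hr x hx)
          rw [pvLoopA]
          simp only [chk_none h rest hr']
          rw [if_pos (by norm_num)]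
          show h :: rest = pvMerge h rest
          exact (pvMerge_noColon rest h hhf hr').symm

-- --- tightness: inside D, A's output keeps ≥ 2 elements with a ':'-ending head,
-- --- while pvMerge with a ':'-ending head can only produce a singleton ending ':'

theorem pvMerge_head_colon (l : List String) : ∀ cur,
    pvEndsColon (((pvMerge cur l).headD "")) = true → (pvMerge cur l).length = 1 := by
  induction l with
  | nil => intro cur _; rfl
  | cons s ss ih =>
    intro cur hc
    by_cases h : pvEndsColon cur = true
    · rw [pvMerge, if_pos h] at hc ⊢
      exact ih (cur ++ s) hc
    · rw [pvMerge, if_neg (by simp [h])] at hc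
      simp at hc
      simp [hc] at h

theorem pvLoopA_stalled : ∀ (fuel : Nat) (l : List String), l.length < fuel → PreS l →
    DS l →
    2 ≤ (pvLoopA fuel l).length ∧ pvEndsColon ((pvLoopA fuel l).headD "") = true := by
  intro fuel
  induction fuel with
  | zero => intro l hlen; omega
  | succ f ih =>
    intro l hlen hp hD
    match l with
    | [] => exact absurd hD (by intro ⟨h1, _, _⟩; simp at h1)
    | h :: rest =>
      have hh : pvEndsColon h = true := pvD_head h rest hD
      by_cases hr : ∃ x ∈ rest, pvEndsColon x = true
      · match rest, hr with
        | r0 :: rs, hr =>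
          have hr0ne : r0 ≠ "" := hp.1 r0 (by simp)
          have hchk : check_list_substrings (([] : List String) ++ h :: r0 :: rs)
              = ((([] : List String)).length : Int) := by
            simpa using chk_head h (r0 :: rs) hh hr
          have hstep := loop_step f [] h r0 rs hchk
          simp only [List.nil_append] at hstep
          rw [hstep]
          have hp' : PreS ((h ++ r0) :: rs) := by
            have := preS_merge [] h r0 rs (by simpa using hp)
            simpa using this
          -- D is preserved forwards here: a colon exists in rest, so the colon prefix has length ≥ 2
          have hD' : DS ((h ++ r0) :: rs) := by
            obtain ⟨h1, h2, h3⟩ := hD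
            have hcr0 : pvEndsColon r0 = true := by
              by_contra hc
              have hcf : pvEndsColon r0 = false := by cases hx : pvEndsColon r0 <;> simp_all
              -- then the colon prefix is [h] and rest would contain no colon, contradiction with hr
              have e : (h :: r0 :: rs).takeWhile pvEndsColon = [h] := by
                simp [List.takeWhile_cons, hh, hcf]
              rw [e] at h3
              obtain ⟨x, hx, hcx⟩ := hr
              have := h3 x (by simpa using hx)
              simp [this] at hcx
            have hm : pvEndsColon (h ++ r0) = true := by
              have he : pvEndsColon (h ++ r0) = pvEndsColon r0 := pv_ends_append h r0 hr0ne
              rw [he]; exact hcr0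
            have e1 : ((h ++ r0) :: rs).takeWhile pvEndsColon
                = (h ++ r0) :: rs.takeWhile pvEndsColon := by
              simp [List.takeWhile_cons, hm]
            have e2 : (h :: r0 :: rs).takeWhile pvEndsColon
                = h :: r0 :: rs.takeWhile pvEndsColon := by
              simp [List.takeWhile_cons, hh, hcr0]
            rw [e2] at h2 h3
            refine ⟨by simp [e1], by rw [e1]; simp at h2 ⊢; omega, ?_⟩
            rw [e1]; simpa using h3
          exact ih ((h ++ r0) :: rs) (by simp at hlen ⊢; omega) hp' hD'
      · push_neg at hr
        have hr' : ∀ x ∈ rest, pvEndsColon x = false := by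
          intro x hx; cases hcx : pvEndsColon x
          · rfl
          · exact absurd hcx (hr x hx)
        have hrest_ne : rest ≠ [] := by
          obtain ⟨_, h2, _⟩ := hD
          intro hnil
          rw [hnil] at h2
          simp [List.takeWhile_cons, hh] at h2
        rw [pvLoopA]
        simp only [chk_none h rest hr']
        rw [if_pos (by norm_num)]
        constructor
        · match rest, hrest_ne with
          | r :: rs, _ => simp
        · simpa using hh

theorem assign_speakers_eq_alt (l : List String) (hp : Pre_assign_speakers l)
    (hD : ¬ DS l) : assign_speakers l = assign_speakers_alt l := by
  have := pv_main (l.length + 1) l (by omega) ((pre_iff_preS l).mp hp) hD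
  simpa [assign_speakers] using this

-- ===== VERDICT (by name: the statement is the Claim_ definition above) =====
theorem assign_speakers_spec : Claim_unchanged_assign_speakers := by
  intro l _ hp
  unfold Spec_assign_speakers
  intro hD
  exact assign_speakers_eq_alt l hp (fun hd => hD ((d_iff_dS l).mpr hd))

theorem assign_speakers_changed : Claim_changed_assign_speakers := by
  unfold Claim_changed_assign_speakers; decide

theorem assign_speakers_tight : Claim_exact_assign_speakers := by
  intro l _ hp hD0 heq
  have hD : DS l := (d_iff_dS l).mp hD0
  have h1 := pvLoopA_stalled (l.length + 1) l (by omega) ((pre_iff_preS l).mp hp) hD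
  have hAe : assign_speakers l = pvLoopA (l.length + 1) l := by
    simp [assign_speakers]
  rw [hAe] at heq
  match l, hD with
  | h :: rest, hD =>
    have halt : assign_speakers_alt (h :: rest) = pvMerge h rest := rfl
    rw [halt] at heq
    have hhead : pvEndsColon ((pvMerge h rest).headD "") = true := by
      rw [← heq]; exact h1.2
    have hlen1 := pvMerge_head_colon rest h hhead
    have h2 := h1.1
    rw [heq] at h2
    omega
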